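-- pv_equiv track=rewrite | github.com/pvphaneuf/seqpostproc | seqpostproc/trim_galore_all_paired.py | get_sample_file_dict
-- ===== SOURCE A (Python) =====
-- import collections
--
-- SAMPLE_FILE_EXTENSION = ".fastq"
--
-- SAMPLE_NAME_DELIMITER = "_S"
--
-- FIND_SUBSTRING_FAILURE = -1
--
-- def get_sample_file_dict(local_file_list):
--
--     sample_file_list = get_local_sample_file_list(local_file_list)
--
--     sample_list = get_local_samples(local_file_list)
--
--     sample_file_dict = collections.defaultdict(list)
--
--     for sample in sample_list:
--
--         # appending SAMPLE_NAME_DELIMITER ("_S") to the end of a sample name since asdf_1_S1.fastq will include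
--         # asdf_10_S1.fastq as an additional sample file if there are no delimiters after the sample value.
--         sample_name_with_delimiter = sample + SAMPLE_NAME_DELIMITER
--
--         for sample_file in sample_file_list:
--
--             if sample_name_with_delimiter in sample_file:
--
--                 sample_file_dict[sample].append(sample_file)
--
--     return sample_file_dict
--
-- def get_local_samples(local_file_list):
--
--     local_sample_file_list = get_local_sample_file_list(local_file_list)
--
--     sample_list = []
--
--     for local_sample in local_sample_file_list:
--
--         sample_list.append(parse_sample_name(local_sample))
--
--     unique_sample_list = remove_sample_duplicates(sample_list)
--
--     return unique_sample_list
--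
-- def parse_sample_name(file_name):
--
--     sample_name_delimiter_index = file_name.find(SAMPLE_NAME_DELIMITER)
--
--     sample_name = file_name[0:sample_name_delimiter_index]
--
--     return sample_name
--
-- def remove_sample_duplicates(sample_file_list):
--
--     ret_list = list(set(sample_file_list))
--
--     return ret_list
--
-- def get_local_sample_file_list(local_file_list):
--
--     local_sample_file_list = []
--
--     for file_name in local_file_list:
--
--         if is_sample_file(file_name):
--             local_sample_file_list.append(file_name)
--
--     return local_sample_file_list
--
-- def is_sample_file(file_name):
--
--     ret_val = False
--
--     if file_name.find(SAMPLE_FILE_EXTENSION) != FIND_SUBSTRING_FAILURE: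
--         ret_val = True
--
--     return ret_val
-- ===== SOURCE B (Python) =====
-- SAMPLE_FILE_EXTENSION = ".fastq"
--
-- SAMPLE_NAME_DELIMITER = "_S"
--
--
-- def get_sample_file_dict(local_file_list):
--     # Multi-pattern substring search in one pass over the files: at each
--     # occurrence of "_S" in a file, look up the text of each possible sample
--     # length ending there in a hash set of the sample names.  The per-sample
--     # scan over the whole file list disappears.
--     fastq_files = [f for f in local_file_list if SAMPLE_FILE_EXTENSION in f]
--     samples = list(dict.fromkeys(f[:f.find(SAMPLE_NAME_DELIMITER)] for f in fastq_files))
--     sample_set = set(samples)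
--     lengths = sorted({len(s) for s in samples})
--     buckets = {}
--     for f in fastq_files:
--         matched = set()
--         i = f.find(SAMPLE_NAME_DELIMITER)
--         while i != -1:
--             for n in lengths:
--                 if n <= i:
--                     name = f[i - n:i]
--                     if name in sample_set:
--                         matched.add(name)
--             i = f.find(SAMPLE_NAME_DELIMITER, i + 1)
--         for name in matched:
--             buckets.setdefault(name, []).append(f)
--     return {s: buckets[s] for s in samples if s in buckets}
-- ===== Notes on version B (the rewrite author's own statement) =====
-- stated objective: faster
-- what changed: Instead of scanning every file once per sample (a substring test per sample/file pair), B makes one pass over the files: at each '_S' occurrence (found by repeated str.find) it looks up the text of each possible sample length ending there in a hash set of the sample names, so the per-sample scan over the file list disappears.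
import Mathlib
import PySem

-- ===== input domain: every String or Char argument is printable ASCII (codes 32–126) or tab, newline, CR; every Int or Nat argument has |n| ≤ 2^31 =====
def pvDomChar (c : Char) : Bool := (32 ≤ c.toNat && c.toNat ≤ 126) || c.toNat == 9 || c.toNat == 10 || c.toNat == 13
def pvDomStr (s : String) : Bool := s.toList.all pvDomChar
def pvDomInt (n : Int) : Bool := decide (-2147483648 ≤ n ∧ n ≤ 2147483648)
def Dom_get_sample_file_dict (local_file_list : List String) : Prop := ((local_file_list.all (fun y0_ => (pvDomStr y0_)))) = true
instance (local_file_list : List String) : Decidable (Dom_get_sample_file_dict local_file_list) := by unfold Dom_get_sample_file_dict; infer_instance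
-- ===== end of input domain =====

-- B replaces A's sample-outer × file-inner substring scan by one pass over the files: at each "_S"
-- occurrence (found by repeated str.find) it looks up the text of each possible sample-name length
-- ending there in a hash set of the sample names, so the per-sample scan over the files disappears
-- (measured faster). Python's list(set(...)) iteration order is not modelled: both ports use
-- first-occurrence order (the Python result is a dict, compared ignoring order).

-- ===== PORT A =====
def pvIsSampleFile (file_name : String) : Bool :=
  PySem.Str.find file_name ".fastq" != -1

def pvLocalSampleFileList (local_file_list : List String) : List String :=
  local_file_list.foldl (fun acc f => if pvIsSampleFile f then acc ++ [f] else acc) []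

def pvParseSampleName (file_name : String) : String :=
  String.ofList (PySem.List.slice file_name.toList (some 0) (some (PySem.Str.find file_name "_S")))

def pvRemoveSampleDuplicates (sample_file_list : List String) : List String :=
  PySem.Set.ofList sample_file_list

def pvGetLocalSamples (local_file_list : List String) : List String :=
  pvRemoveSampleDuplicates
    ((pvLocalSampleFileList local_file_list).foldl (fun acc f => acc ++ [pvParseSampleName f]) [])

def get_sample_file_dict (local_file_list : List String) : List (String × List String) :=
  let sample_file_list := pvLocalSampleFileList local_file_list
  let sample_list := pvGetLocalSamples local_file_list
  (sample_list.foldl (fun d sample =>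
      -- sample + "_S" (string concatenation and containment, ported on char lists — exact)
      sample_file_list.foldl (fun d f =>
        if PySem.Chars.isIn (sample.toList ++ ['_', 'S']) f.toList then
          d.modify sample [] (· ++ [f])
        else d) d)
    PySem.Dict.empty).items

-- ===== PORT B =====
def pvSampleNameB (file_name : String) : String :=
  String.ofList (PySem.List.slice file_name.toList none
    (some (PySem.Str.find file_name "_S")))

-- the body of B's "for n in lengths" loop at delimiter position i of file f
def pvCheckLengths (f : List Char) (lengths : List Int) (st : PySem.Set String)
    (i : Int) (m : PySem.Set String) : PySem.Set String :=
  lengths.foldl (fun m n =>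
    if n ≤ i then
      if PySem.Set.contains st (String.ofList (PySem.List.slice f (some (i - n)) (some i))) then
        PySem.Set.add m (String.ofList (PySem.List.slice f (some (i - n)) (some i)))
      else m
    else m) m

-- B's "while i != -1" loop; fuel = a totality guard only (i strictly increases each round)
def pvMatchedLoop (f : List Char) (lengths : List Int) (st : PySem.Set String) :
    Nat → Int → PySem.Set String → PySem.Set String
  | 0, _, m => m
  | fuel + 1, i, m =>
    if i = -1 then m
    else
      pvMatchedLoop f lengths st fuel (PySem.Chars.findFrom f ['_', 'S'] (i + 1) none)
        (pvCheckLengths f lengths st i m)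

def pvMatchedB (lengths : List Int) (st : PySem.Set String) (f : String) : PySem.Set String :=
  pvMatchedLoop f.toList lengths st (f.toList.length + 1)
    (PySem.Chars.find f.toList ['_', 'S']) PySem.Set.empty

def get_sample_file_dict_alt (local_file_list : List String) : List (String × List String) :=
  let fastq_files := local_file_list.filter (fun f => PySem.Str.isIn ".fastq" f)
  let samples := PySem.List.dedup (fastq_files.map pvSampleNameB)
  let sample_set := PySem.Set.ofList samples
  let lengths := PySem.List.sorted (PySem.Set.ofList (samples.map (fun s => PySem.Str.len s))) (fun n => n) false
  let buckets := fastq_files.foldl (fun b f =>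
      (pvMatchedB lengths sample_set f).foldl (fun b s => b.modify s [] (· ++ [f])) b)
    PySem.Dict.empty
  samples.foldl (fun out s =>
    if buckets.contains s then out ++ [(s, buckets.getD s [])] else out) []

-- ===== PRECONDITION & SPEC =====
def Spec_get_sample_file_dict (local_file_list : List String) (out : List (String × List String)) : Prop := out = get_sample_file_dict_alt local_file_list
instance (local_file_list : List String) (out : List (String × List String)) : Decidable (Spec_get_sample_file_dict local_file_list out) := by unfold Spec_get_sample_file_dict; infer_instance

-- ===== CLAIM (what is proved, stated in full; the proofs are below) =====
def Claim_equal_get_sample_file_dict : Prop := ∀ (local_file_list : List String), Dom_get_sample_file_dict local_file_list → Spec_get_sample_file_dict local_file_list (get_sample_file_dict local_file_list)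

-- ===== LEMMAS AND PROOFS =====

-- generic membership through a guarded fold
theorem pv_mem_foldl_guard {α β : Type} (step : List β → α → List β) (P : α → β → Prop)
    (h : ∀ acc x y, y ∈ step acc x ↔ y ∈ acc ∨ P x y) :
    ∀ (l : List α) (acc : List β) (y : β), y ∈ l.foldl step acc ↔ y ∈ acc ∨ ∃ x ∈ l, P x y := by
  intro l
  induction l with
  | nil => simp
  | cons x xs ih =>
    intro acc y
    simp only [List.foldl_cons, ih, h, List.mem_cons]
    constructor
    · rintro ((hy | hy) | ⟨x', hx', hy⟩)
      · exact Or.inl hy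
      · exact Or.inr ⟨x, Or.inl rfl, hy⟩
      · exact Or.inr ⟨x', Or.inr hx', hy⟩
    · rintro (hy | ⟨x', (rfl | hx'), hy⟩)
      · exact Or.inl (Or.inl hy)
      · exact Or.inl (Or.inr hy)
      · exact Or.inr ⟨x', hx', hy⟩

theorem pv_nodup_foldl {α β : Type} (step : List β → α → List β)
    (h : ∀ acc x, acc.Nodup → (step acc x).Nodup) :
    ∀ (l : List α) (acc : List β), acc.Nodup → (l.foldl step acc).Nodup := by
  intro l
  induction l with
  | nil => intro acc hacc; simpa using hacc
  | cons x xs ih => intro acc hacc; exact ih _ (h acc x hacc)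

-- the candidates B records at delimiter position i
def pvCand (f : List Char) (lengths : List Int) (st : PySem.Set String) (i : Int) (s : String) : Prop :=
  ∃ n ∈ lengths, n ≤ i ∧
    String.ofList (PySem.List.slice f (some (i - n)) (some i)) = s ∧ s ∈ st

theorem pv_mem_checkLengths (f : List Char) (lengths : List Int) (st : PySem.Set String)
    (i : Int) (m : PySem.Set String) (s : String) :
    s ∈ pvCheckLengths f lengths st i m ↔ s ∈ m ∨ pvCand f lengths st i s := by
  unfold pvCheckLengths pvCand
  exact pv_mem_foldl_guard _
    (fun n y => n ≤ i ∧ String.ofList (PySem.List.slice f (some (i - n)) (some i)) = y ∧ y ∈ st)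
    (by
      intro acc n y
      by_cases hni : n ≤ i
      · rw [if_pos hni]
        by_cases hc : String.ofList (PySem.List.slice f (some (i - n)) (some i)) ∈ st
        · rw [if_pos (by simpa [PySem.Set.contains_iff] using hc), PySem.Set.mem_add]
          constructor
          · rintro (hy | rfl)
            · exact Or.inl hy
            · exact Or.inr ⟨hni, rfl, hc⟩
          · rintro (hy | ⟨_, rfl, _⟩)
            · exact Or.inl hy
            · exact Or.inr rfl
        · rw [if_neg (by simpa [PySem.Set.contains_iff] using hc)]
          constructor
          · exact Or.inl
          · rintro (hy | ⟨_, rfl, hst⟩)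
            · exact hy
            · exact absurd hst hc
      · rw [if_neg hni]
        constructor
        · exact Or.inl
        · rintro (hy | ⟨hni', _, _⟩)
          · exact hy
          · exact absurd hni' hni) _ _ _

theorem pv_nodup_checkLengths (f : List Char) (lengths : List Int) (st : PySem.Set String)
    (i : Int) (m : PySem.Set String) (hm : m.Nodup) :
    (pvCheckLengths f lengths st i m).Nodup := by
  unfold pvCheckLengths
  apply pv_nodup_foldl _ _ _ _ hm
  intro acc n h
  split_ifs with h1 h2
  · exact PySem.Set.nodup_add _ _ h
  · exact h
  · exact h

-- what B's while loop collects, starting the find at position k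
theorem pv_mem_matchedLoop (f : List Char) (lengths : List Int) (st : PySem.Set String) (s : String) :
    ∀ (fuel : Nat) (k : Nat) (m : PySem.Set String), k ≤ f.length → f.length + 1 - k ≤ fuel →
    (s ∈ pvMatchedLoop f lengths st fuel (PySem.Chars.findFrom f ['_', 'S'] (k : Int) none) m ↔
      s ∈ m ∨ ∃ p : Nat, k ≤ p ∧ ['_', 'S'] <+: f.drop p ∧ pvCand f lengths st (p : Int) s) := by
  intro fuel
  induction fuel with
  | zero => intro k m hk hf; omega
  | succ fuel ih =>
    intro k m hk hf
    by_cases hr : PySem.Chars.findFrom f ['_', 'S'] (k : Int) none = -1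
    · rw [pvMatchedLoop, if_pos hr]
      rw [PySem.Chars.findFrom_natCast_eq_neg_one_iff f ['_', 'S'] k hk] at hr
      constructor
      · exact Or.inl
      · rintro (hy | ⟨p, hkp, hocc, _⟩)
        · exact hy
        · exfalso
          apply hr
          rw [← PySem.Chars.isIn_iff_infix, ← PySem.Chars.exists_prefix_drop_iff_isIn]
          refine ⟨p - k, ?_⟩
          have hdd : (f.drop k).drop (p - k) = f.drop p := by
            rw [List.drop_drop]; congr 1; omega
          rw [hdd]
          exact hocc
    · rw [pvMatchedLoop, if_neg hr]
      obtain ⟨hkr, hocc, hmin⟩ := PySem.Chars.findFrom_natCast_spec f ['_', 'S'] k hk hr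
      set r : Int := PySem.Chars.findFrom f ['_', 'S'] (k : Int) none with hrdef
      have hr0 : 0 ≤ r := le_trans (by exact_mod_cast Nat.zero_le k) hkr
      have hrlen : r.toNat < f.length := by
        have := hocc.length_le
        simp at this
        omega
      have hcast : r + 1 = ((r.toNat + 1 : Nat) : Int) := by omega
      have hcast2 : ((r.toNat : Nat) : Int) = r := by omega
      rw [hcast, ih (r.toNat + 1) _ (by omega) (by omega)]
      rw [pv_mem_checkLengths]
      constructor
      · rintro ((hy | hc) | ⟨p, hkp, hocc', hcand⟩)
        · exact Or.inl hy
        · exact Or.inr ⟨r.toNat, by omega, hocc, by rw [hcast2]; exact hc⟩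
        · exact Or.inr ⟨p, by omega, hocc', hcand⟩
      · rintro (hy | ⟨p, hkp, hocc', hcand⟩)
        · exact Or.inl (Or.inl hy)
        · by_cases hpr : p < r.toNat
          · exact absurd hocc' (hmin p hkp hpr)
          · by_cases hpe : p = r.toNat
            · subst hpe
              rw [hcast2] at hcand
              exact Or.inl (Or.inr hcand)
            · exact Or.inr ⟨p, by omega, hocc', hcand⟩

theorem pv_nodup_matchedLoop (f : List Char) (lengths : List Int) (st : PySem.Set String) :
    ∀ (fuel : Nat) (i : Int) (m : PySem.Set String), m.Nodup →
      (pvMatchedLoop f lengths st fuel i m).Nodup := by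
  intro fuel
  induction fuel with
  | zero => intro i m hm; exact hm
  | succ fuel ih =>
    intro i m hm
    rw [pvMatchedLoop]
    split_ifs with h
    · exact hm
    · exact ih _ _ (pv_nodup_checkLengths f lengths st i m hm)

theorem pv_nodup_matchedB (lengths : List Int) (st : PySem.Set String) (f : String) :
    (pvMatchedB lengths st f).Nodup :=
  pv_nodup_matchedLoop _ _ _ _ _ _ List.nodup_nil

-- B's matched set is exactly {s ∈ sample set | s ++ "_S" a substring of f}
theorem pv_mem_matchedB (lengths : List Int) (st : PySem.Set String) (f : String) (s : String)
    (hnn : ∀ n ∈ lengths, 0 ≤ n)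
    (hlen : ∀ s' ∈ st, ((s'.toList.length : Int)) ∈ lengths) :
    s ∈ pvMatchedB lengths st f ↔ s ∈ st ∧ PySem.Chars.isIn (s.toList ++ ['_', 'S']) f.toList = true := by
  unfold pvMatchedB
  rw [show PySem.Chars.find f.toList ['_', 'S'] = PySem.Chars.findFrom f.toList ['_', 'S'] ((0 : Nat) : Int) none by
        simp,
      pv_mem_matchedLoop f.toList lengths st s _ 0 _ (by omega) (by omega),
      PySem.Chars.isIn_iff_infix]
  constructor
  · rintro (hy | ⟨p, _, hocc, n, hnl, hni, hsl, hst⟩)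
    · simp [PySem.Set.empty] at hy
    · refine ⟨hst, ?_⟩
      have hn0 : 0 ≤ n := hnn n hnl
      have hplen : p + 2 ≤ f.toList.length := by
        have h2 := hocc.length_le
        rw [List.length_drop] at h2
        simp only [List.length_cons, List.length_nil] at h2
        omega
      rw [PySem.List.slice_toNat _ (by omega) (by omega)] at hsl
      have h1 : ((p : Int) - n).toNat = p - n.toNat := by omega
      have h2 : ((p : Int)).toNat = p := by omega
      rw [h1, h2] at hsl
      have hslL : (f.toList.drop (p - n.toNat)).take (p - (p - n.toNat)) = s.toList := by
        have := congrArg String.toList hsl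
        simpa using this
      -- f = take (p - n.toNat) ++ s.toList ++ ['_','S'] ++ rest
      obtain ⟨t, hocc'⟩ := hocc
      refine ⟨f.toList.take (p - n.toNat), t, ?_⟩
      have hsplit1 : f.toList = f.toList.take (p - n.toNat) ++ f.toList.drop (p - n.toNat) :=
        (List.take_append_drop _ _).symm
      have hsplit2 : f.toList.drop (p - n.toNat) = s.toList ++ f.toList.drop p := by
        rw [← hslL]
        have : f.toList.drop p = (f.toList.drop (p - n.toNat)).drop (p - (p - n.toNat)) := by
          rw [List.drop_drop]; congr 1; omega
        rw [this]
        exact (List.take_append_drop _ _).symm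
      calc f.toList.take (p - n.toNat) ++ (s.toList ++ ['_', 'S']) ++ t
          = f.toList.take (p - n.toNat) ++ (s.toList ++ (['_', 'S'] ++ t)) := by
            simp [List.append_assoc]
        _ = f.toList.take (p - n.toNat) ++ (s.toList ++ f.toList.drop p) := by rw [hocc']
        _ = f.toList := by rw [← hsplit2, ← hsplit1]
  · rintro ⟨hst, a, b, hcs⟩
    have hsplit : f.toList = (a ++ s.toList) ++ (['_', 'S'] ++ b) := by
      rw [← hcs]; simp [List.append_assoc]
    refine Or.inr ⟨a.length + s.toList.length, by omega, ?_, (s.toList.length : Int),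
      hlen s hst, by omega, ?_, hst⟩
    · have hd : ((a ++ s.toList) ++ (['_', 'S'] ++ b)).drop (a.length + s.toList.length)
          = ['_', 'S'] ++ b := List.drop_left' (by simp)
      rw [hsplit, hd]
      exact ⟨b, rfl⟩
    · rw [PySem.List.slice_toNat _ (by omega) (by omega)]
      have h1 : (((a.length + s.toList.length : Nat) : Int) - (s.toList.length : Int)).toNat = a.length := by omega
      have h2 : (((a.length + s.toList.length : Nat) : Int)).toNat = a.length + s.toList.length := by omega
      rw [h1, h2, hsplit]
      have hd : ((a ++ s.toList) ++ (['_', 'S'] ++ b)).drop a.length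
          = s.toList ++ (['_', 'S'] ++ b) := by
        rw [List.append_assoc, List.drop_left' rfl]
      rw [hd]
      have h3 : a.length + s.toList.length - a.length = s.toList.length := by omega
      rw [h3, List.take_left' rfl]
      exact String.ofList_toList

-- === A-side dict lemmas ===
theorem pv_get?_mk_fresh (l : List (String × List String)) (s : String) (h : ∀ p ∈ l, p.1 ≠ s) :
    (PySem.Dict.mk l).get? s = none := by
  induction l with
  | nil => rfl
  | cons p t ih =>
    obtain ⟨k, v⟩ := p
    rw [PySem.Dict.get?_mk_cons, if_neg]
    · exact ih (fun q hq => h q (List.mem_cons_of_mem _ hq))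
    · simpa using h (k, v) List.mem_cons_self

theorem pv_get?_mk_last (l : List (String × List String)) (s : String) (v : List String)
    (h : ∀ p ∈ l, p.1 ≠ s) :
    (PySem.Dict.mk (l ++ [(s, v)])).get? s = some v := by
  induction l with
  | nil => simp [PySem.Dict.get?_mk_cons]
  | cons p t ih =>
    obtain ⟨k, w⟩ := p
    rw [List.cons_append, PySem.Dict.get?_mk_cons, if_neg]
    · exact ih (fun q hq => h q (List.mem_cons_of_mem _ hq))
    · simpa using h (k, w) List.mem_cons_self

theorem pv_modify_mk_fresh (l : List (String × List String)) (s : String) (f : String)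
    (h : ∀ p ∈ l, p.1 ≠ s) :
    (PySem.Dict.mk l).modify s [] (· ++ [f]) = PySem.Dict.mk (l ++ [(s, [f])]) := by
  unfold PySem.Dict.modify
  rw [PySem.Dict.getD_eq_get?_getD, pv_get?_mk_fresh l s h]
  apply PySem.Dict.ext
  rw [PySem.Dict.items_insert_of_not_contains]
  · rfl
  · rw [PySem.Dict.contains_eq_isSome_get?, pv_get?_mk_fresh l s h]
    rfl

theorem pv_modify_mk_last (l : List (String × List String)) (s : String) (v : List String) (f : String)
    (h : ∀ p ∈ l, p.1 ≠ s) :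
    (PySem.Dict.mk (l ++ [(s, v)])).modify s [] (· ++ [f]) = PySem.Dict.mk (l ++ [(s, v ++ [f])]) := by
  unfold PySem.Dict.modify
  rw [PySem.Dict.getD_eq_get?_getD, pv_get?_mk_last l s v h]
  apply PySem.Dict.ext
  rw [PySem.Dict.items_insert_of_contains]
  · show (l ++ [(s, v)]).map _ = l ++ [(s, v ++ [f])]
    rw [List.map_append]
    congr 1
    · rw [List.map_congr_left (g := id) (fun p hp => by simp [h p hp]), List.map_id]
    · simp
  · rw [PySem.Dict.contains_eq_isSome_get?, pv_get?_mk_last l s v h]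
    rfl

theorem pv_innerA' (s : String) (files : List String) :
    ∀ (l : List (String × List String)) (v : List String), (∀ p ∈ l, p.1 ≠ s) →
    files.foldl (fun d f =>
        if PySem.Chars.isIn (s.toList ++ ['_', 'S']) f.toList then d.modify s [] (· ++ [f]) else d)
      (PySem.Dict.mk (l ++ [(s, v)]))
    = PySem.Dict.mk (l ++ [(s, v ++ files.filter (fun f => PySem.Chars.isIn (s.toList ++ ['_', 'S']) f.toList))]) := by
  induction files with
  | nil => intro l v h; simp
  | cons f fs ih =>
    intro l v h
    rw [List.foldl_cons]
    by_cases hc : PySem.Chars.isIn (s.toList ++ ['_', 'S']) f.toList = true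
    · rw [if_pos hc, pv_modify_mk_last l s v f h, ih l (v ++ [f]) h, List.filter_cons, if_pos hc]
      simp
    · rw [if_neg hc, ih l v h, List.filter_cons, if_neg hc]

theorem pv_innerA (s : String) (files : List String) :
    ∀ (l : List (String × List String)), (∀ p ∈ l, p.1 ≠ s) →
    files.foldl (fun d f =>
        if PySem.Chars.isIn (s.toList ++ ['_', 'S']) f.toList then d.modify s [] (· ++ [f]) else d)
      (PySem.Dict.mk l)
    = PySem.Dict.mk (l ++
        if files.filter (fun f => PySem.Chars.isIn (s.toList ++ ['_', 'S']) f.toList) = [] then []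
        else [(s, files.filter (fun f => PySem.Chars.isIn (s.toList ++ ['_', 'S']) f.toList))]) := by
  induction files with
  | nil => intro l h; simp
  | cons f fs ih =>
    intro l h
    rw [List.foldl_cons]
    by_cases hc : PySem.Chars.isIn (s.toList ++ ['_', 'S']) f.toList = true
    · rw [if_pos hc, pv_modify_mk_fresh l s f h, pv_innerA' s fs l [f] h, List.filter_cons, if_pos hc]
      rw [if_neg (List.cons_ne_nil _ _)]
      simp
    · rw [if_neg hc, ih l h, List.filter_cons, if_neg hc]

theorem pv_outerA (files : List String) :
    ∀ (samples : List String) (l : List (String × List String)),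
    samples.Nodup → (∀ s ∈ samples, ∀ p ∈ l, p.1 ≠ s) →
    (samples.foldl (fun d sample =>
        files.foldl (fun d f =>
          if PySem.Chars.isIn (sample.toList ++ ['_', 'S']) f.toList then d.modify sample [] (· ++ [f]) else d) d)
      (PySem.Dict.mk l)).items
    = l ++ (samples.filter (fun s => files.any (fun f => PySem.Chars.isIn (s.toList ++ ['_', 'S']) f.toList))).map
        (fun s => (s, files.filter (fun f => PySem.Chars.isIn (s.toList ++ ['_', 'S']) f.toList))) := by
  intro samples
  induction samples with
  | nil => intro l _ _; simp
  | cons s ss ih =>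
    intro l hnd hfresh
    obtain ⟨hs, hss⟩ := List.nodup_cons.mp hnd
    rw [List.foldl_cons, pv_innerA s files l (hfresh s List.mem_cons_self)]
    by_cases hM : files.filter (fun f => PySem.Chars.isIn (s.toList ++ ['_', 'S']) f.toList) = []
    · rw [if_pos hM, List.append_nil]
      have hany : files.any (fun f => PySem.Chars.isIn (s.toList ++ ['_', 'S']) f.toList) = false := by
        rw [List.any_eq_false]
        intro f hf hb
        exact absurd hM (by simp [List.filter_eq_nil_iff]; exact ⟨f, hf, hb⟩)
      rw [List.filter_cons, if_neg (by simp [hany])]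
      exact ih l hss (fun s' hs' => hfresh s' (List.mem_cons_of_mem _ hs'))
    · rw [if_neg hM]
      have hany : files.any (fun f => PySem.Chars.isIn (s.toList ++ ['_', 'S']) f.toList) = true := by
        rw [List.any_eq_true]
        rcases List.exists_mem_of_ne_nil _ hM with ⟨f, hf⟩
        rw [List.mem_filter] at hf
        exact ⟨f, hf.1, hf.2⟩
      rw [List.filter_cons, if_pos (by simp [hany]), List.map_cons]
      have hfresh' : ∀ s' ∈ ss, ∀ p ∈ l ++ [(s, files.filter (fun f => PySem.Chars.isIn (s.toList ++ ['_', 'S']) f.toList))], p.1 ≠ s' := by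
        intro s' hs' p hp
        rcases List.mem_append.mp hp with hpl | hps
        · exact hfresh s' (List.mem_cons_of_mem _ hs') p hpl
        · rw [List.mem_singleton] at hps
          subst hps
          intro heq
          apply hs
          have hss' : s = s' := heq
          rwa [hss']
      rw [ih (l ++ [(s, files.filter (fun f => PySem.Chars.isIn (s.toList ++ ['_', 'S']) f.toList))]) hss hfresh']
      simp

-- === B-side dict lemmas (generic in the per-file matched list) ===
theorem pv_innerB_getD (f : String) :
    ∀ (hits : List String), hits.Nodup → ∀ (b : PySem.Dict String (List String)) (s : String),
    (hits.foldl (fun b s' => b.modify s' [] (· ++ [f])) b).getD s []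
      = if s ∈ hits then b.getD s [] ++ [f] else b.getD s [] := by
  intro hits
  induction hits with
  | nil => intro _ b s; simp
  | cons h t ih =>
    intro hnd b s
    obtain ⟨hht, ht⟩ := List.nodup_cons.mp hnd
    rw [List.foldl_cons, ih ht]
    simp only [PySem.Dict.getD_modify]
    by_cases hs : s = h
    · subst hs
      simp [hht]
    · simp [hs]

theorem pv_innerB_contains (f : String) :
    ∀ (hits : List String) (b : PySem.Dict String (List String)) (s : String),
    ((hits.foldl (fun b s' => b.modify s' [] (· ++ [f])) b).contains s = true ↔
      s ∈ hits ∨ b.contains s = true) := by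
  intro hits
  induction hits with
  | nil => intro b s; simp
  | cons h t ih =>
    intro b s
    rw [List.foldl_cons, ih]
    simp [PySem.Dict.contains_modify]
    tauto

theorem pv_outerB_getD (hits : String → List String) (hnd : ∀ f, (hits f).Nodup) :
    ∀ (files : List String) (b : PySem.Dict String (List String)) (s : String),
    (files.foldl (fun b f => (hits f).foldl (fun b s => b.modify s [] (· ++ [f])) b) b).getD s []
      = b.getD s [] ++ files.filter (fun f => decide (s ∈ hits f)) := by
  intro files
  induction files with
  | nil => intro b s; simp
  | cons f fs ih =>
    intro b s
    rw [List.foldl_cons, ih, pv_innerB_getD f (hits f) (hnd f)]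
    by_cases hm : s ∈ hits f
    · rw [if_pos hm, List.filter_cons, if_pos (by simpa using hm)]
      simp
    · rw [if_neg hm, List.filter_cons, if_neg (by simpa using hm)]

theorem pv_outerB_contains (hits : String → List String) :
    ∀ (files : List String) (b : PySem.Dict String (List String)) (s : String),
    ((files.foldl (fun b f => (hits f).foldl (fun b s => b.modify s [] (· ++ [f])) b) b).contains s = true ↔
      b.contains s = true ∨ ∃ f ∈ files, s ∈ hits f) := by
  intro files
  induction files with
  | nil => intro b s; simp
  | cons f fs ih =>
    intro b s
    rw [List.foldl_cons, ih, pv_innerB_contains f]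
    simp only [List.mem_cons]
    constructor
    · rintro ((h | h) | ⟨f', hf', hs⟩)
      · exact Or.inr ⟨f, Or.inl rfl, h⟩
      · exact Or.inl h
      · exact Or.inr ⟨f', Or.inr hf', hs⟩
    · rintro (h | ⟨f', (rfl | hf'), hs⟩)
      · exact Or.inl (Or.inr h)
      · exact Or.inl (Or.inl hs)
      · exact Or.inr ⟨f', hf', hs⟩

-- === predicate / parse-name agreement ===
theorem pv_pred_eq (f : String) : pvIsSampleFile f = PySem.Str.isIn ".fastq" f := by
  unfold pvIsSampleFile
  rw [Bool.eq_iff_iff, bne_iff_ne, PySem.Str.find_ne_neg_one_iff, PySem.Str.isIn_iff_infix]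

theorem pv_parse_eq : pvParseSampleName = pvSampleNameB := by
  funext f
  unfold pvParseSampleName pvSampleNameB
  simp [PySem.Str.find_eq]

-- === assembled forms of the two ports ===
theorem pv_A_eq (F S : List String) (hnd : S.Nodup) :
    (S.foldl (fun d sample =>
        F.foldl (fun d f =>
          if PySem.Chars.isIn (sample.toList ++ ['_', 'S']) f.toList then d.modify sample [] (· ++ [f]) else d) d)
      PySem.Dict.empty).items
    = (S.filter (fun s => F.any (fun f => PySem.Chars.isIn (s.toList ++ ['_', 'S']) f.toList))).map
        (fun s => (s, F.filter (fun f => PySem.Chars.isIn (s.toList ++ ['_', 'S']) f.toList))) := by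
  have he : (PySem.Dict.empty : PySem.Dict String (List String)) = PySem.Dict.mk [] := rfl
  rw [he, pv_outerA F S [] hnd (by simp)]
  simp

theorem pv_B_eq (F S : List String) (_hnd : S.Nodup) (_hst : PySem.Set.ofList S = S)
    (L : List Int)
    (hnn : ∀ n ∈ L, 0 ≤ n)
    (hlen : ∀ s' ∈ S, ((s'.toList.length : Int)) ∈ L) :
    (S.foldl (fun out s =>
        if (F.foldl (fun b f => (pvMatchedB L S f).foldl (fun b s => b.modify s [] (· ++ [f])) b) PySem.Dict.empty).contains s then
          out ++ [(s, (F.foldl (fun b f => (pvMatchedB L S f).foldl (fun b s => b.modify s [] (· ++ [f])) b) PySem.Dict.empty).getD s [])]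
        else out) [])
    = (S.filter (fun s => F.any (fun f => PySem.Chars.isIn (s.toList ++ ['_', 'S']) f.toList))).map
        (fun s => (s, F.filter (fun f => PySem.Chars.isIn (s.toList ++ ['_', 'S']) f.toList))) := by
  set B := F.foldl (fun b f => (pvMatchedB L S f).foldl (fun b s => b.modify s [] (· ++ [f])) b) PySem.Dict.empty with hB
  rw [PySem.List.foldl_append_if (fun s => B.contains s) (fun s => (s, B.getD s [])) S []]
  simp only [List.nil_append]
  have hcont : ∀ s, (B.contains s = true ↔ ∃ f ∈ F, s ∈ pvMatchedB L S f) := by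
    intro s
    rw [hB, pv_outerB_contains (pvMatchedB L S) F PySem.Dict.empty s]
    simp
  have hc : ∀ s ∈ S, (B.contains s) = F.any (fun f => PySem.Chars.isIn (s.toList ++ ['_', 'S']) f.toList) := by
    intro s hsS
    have hsst : s ∈ S := hsS
    rw [Bool.eq_iff_iff, hcont s, List.any_eq_true]
    constructor
    · rintro ⟨f, hf, hmem⟩
      rw [pv_mem_matchedB L _ f s hnn hlen] at hmem
      exact ⟨f, hf, hmem.2⟩
    · rintro ⟨f, hf, hco⟩
      exact ⟨f, hf, (pv_mem_matchedB L _ f s hnn hlen).mpr ⟨hsst, hco⟩⟩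
  rw [List.filter_congr hc]
  apply List.map_congr_left
  intro s hs
  rw [List.mem_filter] at hs
  have hsst : s ∈ S := hs.1
  have hgd : B.getD s [] = F.filter (fun f => PySem.Chars.isIn (s.toList ++ ['_', 'S']) f.toList) := by
    rw [hB, pv_outerB_getD (pvMatchedB L S) (fun f => pv_nodup_matchedB L S f) F PySem.Dict.empty s]
    rw [PySem.Dict.getD_empty, List.nil_append]
    apply List.filter_congr
    intro f hf
    rw [Bool.eq_iff_iff, decide_eq_true_eq, pv_mem_matchedB L _ f s hnn hlen]
    exact and_iff_right hsst
  rw [hgd]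

-- ===== VERDICT (by name: the statement is the Claim_ definition above) =====
theorem get_sample_file_dict_spec : Claim_equal_get_sample_file_dict := by
  intro l _
  unfold Spec_get_sample_file_dict
  have hfiles : pvLocalSampleFileList l = List.filter (fun f => PySem.Str.isIn ".fastq" f) l := by
    have h0 : pvLocalSampleFileList l = List.filter (fun f => pvIsSampleFile f) l := by
      unfold pvLocalSampleFileList
      simpa using PySem.List.foldl_append_if (fun g => pvIsSampleFile g) (fun g => g) l []
    rw [h0]
    exact List.filter_congr (fun f _ => pv_pred_eq f)
  have hsamplesA : pvGetLocalSamples l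
      = PySem.Set.ofList ((pvLocalSampleFileList l).map pvParseSampleName) := by
    unfold pvGetLocalSamples pvRemoveSampleDuplicates
    rw [PySem.List.foldl_append_singleton_eq_map]
    simp
  have hnd : (PySem.Set.ofList ((List.filter (fun f => PySem.Str.isIn ".fastq" f) l).map pvSampleNameB)).Nodup :=
    PySem.Set.nodup_ofList _
  have hst := PySem.Set.ofList_eq_self_of_nodup _ hnd
  set S := PySem.Set.ofList ((List.filter (fun f => PySem.Str.isIn ".fastq" f) l).map pvSampleNameB) with hS
  set L := PySem.List.sorted (PySem.Set.ofList (S.map (fun s => PySem.Str.len s))) (fun n => n) false with hL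
  have hnn : ∀ n ∈ L, 0 ≤ n := by
    intro n hn
    rw [hL, PySem.List.mem_sorted, PySem.Set.mem_ofList, List.mem_map] at hn
    obtain ⟨s', _, rfl⟩ := hn
    simp [PySem.Str.len_eq]
  have hlen : ∀ s' ∈ S, ((s'.toList.length : Int)) ∈ L := by
    intro s' hs'
    rw [hL, PySem.List.mem_sorted, PySem.Set.mem_ofList]
    exact List.mem_map.mpr ⟨s', hs', by simp [PySem.Str.len_eq]⟩
  simp only [get_sample_file_dict, get_sample_file_dict_alt]
  rw [hsamplesA, hfiles, pv_parse_eq, PySem.List.dedup_eq_ofList]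
  rw [← hS, ← hL, hst]
  exact (pv_A_eq (List.filter (fun f => PySem.Str.isIn ".fastq" f) l) S hnd).trans
        (pv_B_eq (List.filter (fun f => PySem.Str.isIn ".fastq" f) l) S hnd hst L hnn hlen).symm
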